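-- pv_equiv track=rewrite | github.com/brendonthiede/hackerrank-python-challenge | strings/05_designer_door_mat.py | make_mat
-- ===== SOURCE A (Python) =====
-- import math
--
-- def get_row(row_number, width):
--     return ('.|.' * (row_number * 2 + 1)).center(width, '-')
--
-- def make_mat(height, width):
--     first_half = int(math.floor(height / 2))
--     mat = []
--     for i in range(0, first_half):
--         mat.append(get_row(i, width))
--     mat.append('WELCOME'.center(width, '-'))
--     for i in range(first_half - 1, -1, -1):
--         mat.append(get_row(i, width))
--     return "\n".join(mat)
-- ===== SOURCE B (Python) =====
-- def make_mat(height, width):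
--     fh = max(height // 2, 0)
--     rows = []
--     for r in range(2 * fh + 1):
--         if r == fh:
--             rows.append('WELCOME'.center(width, '-'))
--         else:
--             rows.append(('.|.' * (2 * min(r, 2 * fh - r) + 1)).center(width, '-'))
--     return "\n".join(rows)
-- ===== Notes on version B (the rewrite author's own statement) =====
-- stated objective: alternative
-- what changed: B runs one single loop over all 2*fh+1 rows of the full mat, computing each row directly from the mirror index min(r, 2*fh-r), instead of A's two generating loops (upward then downward) around the middle row; math.floor(height/2) is replaced by the equivalent height//2 clamped at 0.
import Mathlib
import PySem

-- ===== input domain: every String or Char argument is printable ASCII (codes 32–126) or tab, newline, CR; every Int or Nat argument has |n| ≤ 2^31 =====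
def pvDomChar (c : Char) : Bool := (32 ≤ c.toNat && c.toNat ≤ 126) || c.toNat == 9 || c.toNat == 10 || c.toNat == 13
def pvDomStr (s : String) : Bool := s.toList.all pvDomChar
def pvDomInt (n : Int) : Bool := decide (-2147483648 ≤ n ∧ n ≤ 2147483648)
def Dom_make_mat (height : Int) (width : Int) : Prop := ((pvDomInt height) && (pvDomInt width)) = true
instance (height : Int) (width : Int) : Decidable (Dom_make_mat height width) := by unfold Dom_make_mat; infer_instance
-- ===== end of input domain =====

-- B builds the mat in ONE loop over all rows via the mirror index min(r, 2*fh-r), instead of A's two generating loops; same output, same cost class.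


-- ===== PORT A =====
-- str.center(w, fill), hand port (no PySem primitive): CPython puts the extra pad char
-- left exactly when marg and w are both odd (left = marg//2 + (marg & w & 1)); exact.
def pyCenter (s : List Char) (w : Int) (fill : Char) : List Char :=
  let marg := w - (s.length : Int)
  if marg ≤ 0 then s
  else
    let left := (marg / 2 + (if marg % 2 = 1 ∧ w % 2 = 1 then 1 else 0)).toNat
    List.replicate left fill ++ s ++ List.replicate (marg.toNat - left) fill

def get_row (row_number : Int) (width : Int) : List Char :=
  pyCenter (PySem.List.pyRepeat ".|.".toList (row_number * 2 + 1)) width '-'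

-- int(math.floor(height / 2)) is exactly height // 2 for |height| ≤ 2^31 (h/2 is an exact float)
def make_mat (height : Int) (width : Int) : String :=
  let first_half := PySem.Int.floordiv height 2
  let mat : List (List Char) := []
  let mat := (PySem.List.pyRange 0 first_half 1).foldl (fun m i => m ++ [get_row i width]) mat
  let mat := mat ++ [pyCenter "WELCOME".toList width '-']
  let mat := (PySem.List.pyRange (first_half - 1) (-1) (-1)).foldl (fun m i => m ++ [get_row i width]) mat
  String.ofList (PySem.Chars.join ['\n'] mat)

-- ===== PORT B =====
def make_mat_alt (height : Int) (width : Int) : String :=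
  let fh := max (PySem.Int.floordiv height 2) 0
  let rows := (PySem.List.pyRange 0 (2 * fh + 1) 1).map (fun r =>
    if r = fh then pyCenter "WELCOME".toList width '-'
    else pyCenter (PySem.List.pyRepeat ".|.".toList (2 * min r (2 * fh - r) + 1)) width '-')
  String.ofList (PySem.Chars.join ['\n'] rows)

-- ===== PRECONDITION & SPEC =====
def Spec_make_mat (height : Int) (width : Int) (out : String) : Prop := out = make_mat_alt height width
instance (height : Int) (width : Int) (out : String) : Decidable (Spec_make_mat height width out) := by unfold Spec_make_mat; infer_instance

-- ===== CLAIM (what is proved, stated in full; the proofs are below) =====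
def Claim_equal_make_mat : Prop := ∀ (height : Int) (width : Int), Dom_make_mat height width → Spec_make_mat height width (make_mat height width)

-- ===== LEMMAS AND PROOFS =====
theorem foldl_append_map {α β : Type} (f : α → β) :
    ∀ (l : List α) (acc : List β), l.foldl (fun m i => m ++ [f i]) acc = acc ++ l.map f := by
  intro l
  induction l with
  | nil => simp
  | cons x t ih => intro acc; simp [List.foldl, ih]

-- the single mirror-indexed loop produces exactly top ++ [W] ++ top.reverse
theorem mirror_split (n : Int) (hn : 0 ≤ n) (W : List Char) (row : Int → List Char) :
    (PySem.List.pyRange 0 (2 * n + 1) 1).map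
        (fun r => if r = n then W else row (min r (2 * n - r)))
      = (PySem.List.pyRange 0 n 1).map row ++ [W] ++ ((PySem.List.pyRange 0 n 1).map row).reverse := by
  rw [PySem.List.pyRange_one_append 0 n (2 * n + 1) hn (by omega),
      PySem.List.pyRange_one_append n (n + 1) (2 * n + 1) (by omega) (by omega),
      PySem.List.pyRange_one_singleton]
  simp only [List.map_append, List.append_assoc]
  congr 1
  · apply List.map_congr_left
    intro r hr
    rw [PySem.List.mem_pyRange_one] at hr
    rw [if_neg (by omega), min_eq_left (by omega)]
  · congr 1
    · simp
    rw [PySem.List.pyRange_one, PySem.List.pyRange_one]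
    have h1 : (2 * n + 1 - (n + 1)).toNat = n.toNat := by omega
    have h2 : (n - 0).toNat = n.toNat := by omega
    simp only [h1, h2, ← List.map_reverse, List.map_map]
    rw [List.range_eq_range', List.reverse_range', ← List.range_eq_range']
    simp only [List.map_map]
    apply List.map_congr_left
    intro k hk
    rw [List.mem_range] at hk
    simp only [Function.comp]
    rw [if_neg (by omega), min_eq_right (by omega)]
    congr 1
    omega

theorem get_row_eq (i w : Int) : get_row i w = pyCenter (PySem.List.pyRepeat ".|.".toList (2 * i + 1)) w '-' := by
  simp [get_row, Int.mul_comm]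

-- ===== VERDICT (by name: the statement is the Claim_ definition above) =====
theorem make_mat_spec : Claim_equal_make_mat := by
  intro height width _
  unfold Spec_make_mat make_mat make_mat_alt
  set fh := PySem.Int.floordiv height 2 with hfh
  have hrev : PySem.List.pyRange (fh - 1) (-1) (-1)
      = (PySem.List.pyRange 0 fh 1).reverse := by
    rw [PySem.List.pyRange_neg_one_eq_reverse]; norm_num
  simp only [foldl_append_map, hrev, List.map_reverse, List.nil_append]
  rcases le_or_gt fh 0 with hle | hpos
  · have hmax : max fh 0 = 0 := by omega
    rw [hmax]
    rw [PySem.List.pyRange_one_eq_nil hle]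
    have h01 : PySem.List.pyRange 0 1 1 = [0] := by decide
    simp [h01, PySem.Chars.join]
  · have hmax : max fh 0 = fh := by omega
    have hB := mirror_split fh (le_of_lt hpos) (pyCenter "WELCOME".toList width '-')
      (fun i => pyCenter (PySem.List.pyRepeat ".|.".toList (2 * i + 1)) width '-')
    rw [hmax]
    simp only [] at hB
    rw [hB]
    simp only [List.append_assoc, get_row_eq]
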